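-- pv_equiv track=rewrite | github.com/bearice/bedrock_sso_proxy | bedrock_pricing_scraper.py | get_model_info_from_name
-- ===== SOURCE A (Python) =====
-- def get_model_info_from_name(model_name, model_mapping):
--     """Get model ID and provider from model name using models.json mapping"""
--     # Direct lookup first
--     if model_name in model_mapping:
--         return model_mapping[model_name]
--
--     # Try case-insensitive lookup
--     for mapped_name, model_info in model_mapping.items():
--         if mapped_name.lower() == model_name.lower():
--             return model_info
--
--     # Try partial matches for variations
--     model_name_lower = model_name.lower()
--     for mapped_name, model_info in model_mapping.items():
--         mapped_name_lower = mapped_name.lower()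
--         # Handle common variations
--         if (model_name_lower in mapped_name_lower or
--             mapped_name_lower in model_name_lower or
--             # Handle "3.5 Sonnet v2" -> "Claude 3.5 Sonnet v2"
--             (model_name_lower.replace(' ', '') in mapped_name_lower.replace(' ', '')) or
--             (mapped_name_lower.replace(' ', '') in model_name_lower.replace(' ', ''))):
--             return model_info
--
--     # Fallback: generate basic model ID and try to determine provider
--     fallback_model_id = model_name.replace(' ', '_').replace('-', '_').replace('.', '_').replace('(', '').replace(')', '').lower()
--
--     # Try to determine provider from model name
--     provider = 'Unknown'
--     if 'claude' in model_name_lower: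
--         provider = 'Anthropic'
--     elif 'command' in model_name_lower:
--         provider = 'Cohere'
--     elif 'jurassic' in model_name_lower or 'jamba' in model_name_lower:
--         provider = 'AI21 Labs'
--     elif 'llama' in model_name_lower:
--         provider = 'Meta'
--     elif 'titan' in model_name_lower or 'nova' in model_name_lower:
--         provider = 'Amazon'
--     elif 'mistral' in model_name_lower or 'mixtral' in model_name_lower:
--         provider = 'Mistral AI'
--     elif 'deepseek' in model_name_lower:
--         provider = 'DeepSeek'
--
--     return {
--         'model_id': fallback_model_id,
--         'provider': provider
--     }
-- ===== SOURCE B (Python) =====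
-- PROVIDER_TABLE = [
--     (['claude'], 'Anthropic'),
--     (['command'], 'Cohere'),
--     (['jurassic', 'jamba'], 'AI21 Labs'),
--     (['llama'], 'Meta'),
--     (['titan', 'nova'], 'Amazon'),
--     (['mistral', 'mixtral'], 'Mistral AI'),
--     (['deepseek'], 'DeepSeek'),
-- ]
--
--
-- def _priority(model_name, mn_lower, mn_nospace, mapped_name):
--     """0 = exact, 1 = case-insensitive, 2 = partial, None = no match."""
--     if mapped_name == model_name:
--         return 0
--     mapped_lower = mapped_name.lower()
--     if mapped_lower == mn_lower:
--         return 1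
--     mapped_nospace = mapped_lower.replace(' ', '')
--     if (mn_lower in mapped_lower or mapped_lower in mn_lower or
--             mn_nospace in mapped_nospace or mapped_nospace in mn_nospace):
--         return 2
--     return None
--
--
-- def get_model_info_from_name(model_name, model_mapping):
--     """Get model ID and provider from model name using models.json mapping"""
--     mn_lower = model_name.lower()
--     mn_nospace = mn_lower.replace(' ', '')
--
--     # Single pass: keep the first entry of the best (lowest) priority seen.
--     best = None  # (priority, model_info)
--     for mapped_name, model_info in model_mapping.items():
--         p = _priority(model_name, mn_lower, mn_nospace, mapped_name)
--         if p is not None and (best is None or p < best[0]):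
--             best = (p, model_info)
--     if best is not None:
--         return best[1]
--
--     fallback_model_id = model_name.replace(' ', '_').replace('-', '_').replace('.', '_').replace('(', '').replace(')', '').lower()
--     provider = 'Unknown'
--     for keywords, prov in PROVIDER_TABLE:
--         if any(kw in mn_lower for kw in keywords):
--             provider = prov
--             break
--     return {'model_id': fallback_model_id, 'provider': provider}
-- ===== Notes on version B (the rewrite author's own statement) =====
-- stated objective: alternative
-- what changed: Replaced A's three separate scans over the mapping with one pass keeping the first entry of the best priority (exact > case-insensitive > partial), and replaced the provider if/elif chain by a data-driven keyword table scan.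
import Mathlib
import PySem

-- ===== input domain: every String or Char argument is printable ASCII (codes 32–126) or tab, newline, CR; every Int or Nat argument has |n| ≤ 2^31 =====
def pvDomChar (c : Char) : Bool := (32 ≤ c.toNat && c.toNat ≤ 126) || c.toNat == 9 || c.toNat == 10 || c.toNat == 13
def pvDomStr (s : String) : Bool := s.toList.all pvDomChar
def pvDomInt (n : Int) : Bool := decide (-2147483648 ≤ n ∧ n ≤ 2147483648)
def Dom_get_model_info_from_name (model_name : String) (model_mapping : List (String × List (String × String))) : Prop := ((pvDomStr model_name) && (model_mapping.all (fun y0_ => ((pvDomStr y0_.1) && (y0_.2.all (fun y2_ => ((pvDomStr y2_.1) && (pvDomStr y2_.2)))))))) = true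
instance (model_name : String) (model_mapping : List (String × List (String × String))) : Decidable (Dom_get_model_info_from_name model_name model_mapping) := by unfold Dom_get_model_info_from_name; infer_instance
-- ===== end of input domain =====

-- B replaces A's three successive scans of the mapping by one pass keeping the first entry
-- of the best match priority, and A's provider if/elif chain by a keyword-table scan (objective: alternative).

-- ===== PORT A =====
-- direct dict lookup (first matching key)
def pvLookupA (mn : String) : List (String × List (String × String)) → Option (List (String × String))
  | [] => none
  | (k, v) :: rest => if k == mn then some v else pvLookupA mn rest

-- "for mapped_name, model_info in model_mapping.items(): if mapped_name.lower() == model_name.lower()"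
def pvScanCI (mn : String) : List (String × List (String × String)) → Option (List (String × String))
  | [] => none
  | (k, v) :: rest => if PySem.Str.lower k == PySem.Str.lower mn then some v else pvScanCI mn rest

-- the partial-match loop, over the precomputed model_name_lower
def pvScanPartial (mnl : String) : List (String × List (String × String)) → Option (List (String × String))
  | [] => none
  | (k, v) :: rest =>
      let kl := PySem.Str.lower k
      if PySem.Str.isIn mnl kl || PySem.Str.isIn kl mnl ||
         PySem.Str.isIn (PySem.Str.replace mnl " " "") (PySem.Str.replace kl " " "") ||
         PySem.Str.isIn (PySem.Str.replace kl " " "") (PySem.Str.replace mnl " " "")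
      then some v else pvScanPartial mnl rest

def pvFallbackA (mn mnl : String) : List (String × String) :=
  let fid := PySem.Str.lower (PySem.Str.replace (PySem.Str.replace (PySem.Str.replace (PySem.Str.replace (PySem.Str.replace mn " " "_") "-" "_") "." "_") "(" "") ")" "")
  let provider :=
    if PySem.Str.isIn "claude" mnl then "Anthropic"
    else if PySem.Str.isIn "command" mnl then "Cohere"
    else if PySem.Str.isIn "jurassic" mnl || PySem.Str.isIn "jamba" mnl then "AI21 Labs"
    else if PySem.Str.isIn "llama" mnl then "Meta"
    else if PySem.Str.isIn "titan" mnl || PySem.Str.isIn "nova" mnl then "Amazon"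
    else if PySem.Str.isIn "mistral" mnl || PySem.Str.isIn "mixtral" mnl then "Mistral AI"
    else if PySem.Str.isIn "deepseek" mnl then "DeepSeek"
    else "Unknown"
  [("model_id", fid), ("provider", provider)]

def get_model_info_from_name (model_name : String) (model_mapping : List (String × List (String × String))) : List (String × String) :=
  match pvLookupA model_name model_mapping with
  | some v => v
  | none =>
    match pvScanCI model_name model_mapping with
    | some v => v
    | none =>
      let mnl := PySem.Str.lower model_name
      match pvScanPartial mnl model_mapping with
      | some v => v
      | none => pvFallbackA model_name mnl

-- ===== PORT B =====
-- 0 = exact, 1 = case-insensitive, 2 = partial, none = no match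
def pvPrioB (mn mnl mns k : String) : Option Nat :=
  if k == mn then some 0
  else
    let kl := PySem.Str.lower k
    if kl == mnl then some 1
    else
      let kns := PySem.Str.replace kl " " ""
      if PySem.Str.isIn mnl kl || PySem.Str.isIn kl mnl ||
         PySem.Str.isIn mns kns || PySem.Str.isIn kns mns
      then some 2 else none

-- keep the first entry of the lowest priority seen
def pvStepB (mn mnl mns : String) (acc : Option (Nat × List (String × String))) (e : String × List (String × String)) : Option (Nat × List (String × String)) :=
  match pvPrioB mn mnl mns e.1 with
  | none => acc
  | some p =>
    match acc with
    | none => some (p, e.2)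
    | some (q, w) => if p < q then some (p, e.2) else some (q, w)

def pvTableB : List (List String × String) :=
  [(["claude"], "Anthropic"), (["command"], "Cohere"), (["jurassic", "jamba"], "AI21 Labs"),
   (["llama"], "Meta"), (["titan", "nova"], "Amazon"), (["mistral", "mixtral"], "Mistral AI"),
   (["deepseek"], "DeepSeek")]

def pvProviderB (mnl : String) : List (List String × String) → String
  | [] => "Unknown"
  | (kws, prov) :: rest => if kws.any (fun kw => PySem.Str.isIn kw mnl) then prov else pvProviderB mnl rest

def get_model_info_from_name_alt (model_name : String) (model_mapping : List (String × List (String × String))) : List (String × String) :=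
  let mnl := PySem.Str.lower model_name
  let mns := PySem.Str.replace mnl " " ""
  match model_mapping.foldl (pvStepB model_name mnl mns) none with
  | some (_, v) => v
  | none =>
    let fid := PySem.Str.lower (PySem.Str.replace (PySem.Str.replace (PySem.Str.replace (PySem.Str.replace (PySem.Str.replace model_name " " "_") "-" "_") "." "_") "(" "") ")" "")
    [("model_id", fid), ("provider", pvProviderB mnl pvTableB)]

-- ===== PRECONDITION & SPEC =====
def Spec_get_model_info_from_name (model_name : String) (model_mapping : List (String × List (String × String))) (out : List (String × String)) : Prop := out = get_model_info_from_name_alt model_name model_mapping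
instance (model_name : String) (model_mapping : List (String × List (String × String))) (out : List (String × String)) : Decidable (Spec_get_model_info_from_name model_name model_mapping out) := by unfold Spec_get_model_info_from_name; infer_instance

-- ===== CLAIM (what is proved, stated in full; the proofs are below) =====
def Claim_equal_get_model_info_from_name : Prop := ∀ (model_name : String) (model_mapping : List (String × List (String × String))), Dom_get_model_info_from_name model_name model_mapping → Spec_get_model_info_from_name model_name model_mapping (get_model_info_from_name model_name model_mapping)

-- ===== LEMMAS AND PROOFS =====
-- priority-0 accumulators are absorbing
theorem pvFoldB_zero (mn mnl mns : String) (v : List (String × String))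
    (l : List (String × List (String × String))) :
    l.foldl (pvStepB mn mnl mns) (some (0, v)) = some (0, v) := by
  induction l with
  | nil => rfl
  | cons e rest ih =>
      simp only [List.foldl_cons, pvStepB]
      cases pvPrioB mn mnl mns e.1 with
      | none => exact ih
      | some p => simp [ih]

theorem pvFoldB_one (mn mnl mns : String) (v : List (String × String))
    (l : List (String × List (String × String))) :
    l.foldl (pvStepB mn mnl mns) (some (1, v)) =
      match pvLookupA mn l with
      | some v' => some (0, v')
      | none => some (1, v) := by
  induction l with
  | nil => rfl
  | cons e rest ih =>
      obtain ⟨k, w⟩ := e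
      by_cases hk : (k == mn) = true
      · simp only [List.foldl_cons, pvStepB, pvPrioB, hk, if_pos, pvLookupA]
        simpa using pvFoldB_zero mn mnl mns w rest
      · have hk' : (k == mn) = false := by simpa using hk
        by_cases hci : (PySem.Str.lower k == mnl) = true
        · simp only [List.foldl_cons, pvStepB, pvPrioB, hk', Bool.false_eq_true, if_false, hci,
            if_pos, pvLookupA]
          simpa using ih
        · have hci' : (PySem.Str.lower k == mnl) = false := by simpa using hci
          by_cases hp : (PySem.Str.isIn mnl (PySem.Str.lower k) || PySem.Str.isIn (PySem.Str.lower k) mnl ||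
              PySem.Str.isIn mns (PySem.Str.replace (PySem.Str.lower k) " " "") ||
              PySem.Str.isIn (PySem.Str.replace (PySem.Str.lower k) " " "") mns) = true
          · simp only [List.foldl_cons, pvStepB, pvPrioB, hk', Bool.false_eq_true, if_false, hci',
              hp, if_pos, pvLookupA]
            simpa using ih
          · have hp2 := eq_false_of_ne_true hp
            simp only [List.foldl_cons, pvStepB, pvPrioB, hk', Bool.false_eq_true, if_false, hci',
              hp2, pvLookupA]
            exact ih

theorem pvFoldB_two (mn mnl mns : String) (v : List (String × String))
    (hmnl : mnl = PySem.Str.lower mn)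
    (l : List (String × List (String × String))) :
    l.foldl (pvStepB mn mnl mns) (some (2, v)) =
      match pvLookupA mn l with
      | some v' => some (0, v')
      | none =>
        match pvScanCI mn l with
        | some v' => some (1, v')
        | none => some (2, v) := by
  induction l with
  | nil => rfl
  | cons e rest ih =>
      obtain ⟨k, w⟩ := e
      by_cases hk : (k == mn) = true
      · have hci : (PySem.Str.lower k == PySem.Str.lower mn) = true := by
          simp at hk; simp [hk]
        simp only [List.foldl_cons, pvStepB, pvPrioB, hk, if_pos, pvLookupA]
        simpa using pvFoldB_zero mn mnl mns w rest
      · have hk' : (k == mn) = false := by simpa using hk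
        by_cases hci : (PySem.Str.lower k == mnl) = true
        · have hci' : (PySem.Str.lower k == PySem.Str.lower mn) = true := by rw [← hmnl]; exact hci
          simp only [List.foldl_cons, pvStepB, pvPrioB, hk', Bool.false_eq_true, if_false, hci,
            if_pos, pvLookupA, pvScanCI, hci']
          simpa using pvFoldB_one mn mnl mns w rest
        · have hci' : (PySem.Str.lower k == PySem.Str.lower mn) = false := by
            rw [← hmnl]; simpa using hci
          simp only [List.foldl_cons, pvStepB, pvPrioB, hk', Bool.false_eq_true, if_false, hci,
            pvLookupA, pvScanCI, hci']
          by_cases hp : (PySem.Str.isIn mnl (PySem.Str.lower k) || PySem.Str.isIn (PySem.Str.lower k) mnl ||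
              PySem.Str.isIn mns (PySem.Str.replace (PySem.Str.lower k) " " "") ||
              PySem.Str.isIn (PySem.Str.replace (PySem.Str.lower k) " " "") mns) = true
          · simp only [hp, if_pos]
            simpa using ih
          · simp only [eq_false_of_ne_true hp]
            exact ih

-- the one-pass fold equals A's exact > case-insensitive > partial cascade
theorem pvFoldB_main (mn mnl mns : String)
    (hmnl : mnl = PySem.Str.lower mn) (hmns : mns = PySem.Str.replace mnl " " "")
    (l : List (String × List (String × String))) :
    l.foldl (pvStepB mn mnl mns) none =
      match pvLookupA mn l with
      | some v => some (0, v)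
      | none =>
        match pvScanCI mn l with
        | some v => some (1, v)
        | none =>
          match pvScanPartial mnl l with
          | some v => some (2, v)
          | none => none := by
  induction l with
  | nil => rfl
  | cons e rest ih =>
      obtain ⟨k, w⟩ := e
      by_cases hk : (k == mn) = true
      · have hci : (PySem.Str.lower k == PySem.Str.lower mn) = true := by
          simp at hk; simp [hk]
        simp only [List.foldl_cons, pvStepB, pvPrioB, hk, if_pos, pvLookupA]
        simpa using pvFoldB_zero mn mnl mns w rest
      · have hk' : (k == mn) = false := by simpa using hk
        by_cases hci : (PySem.Str.lower k == mnl) = true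
        · have hci' : (PySem.Str.lower k == PySem.Str.lower mn) = true := by rw [← hmnl]; exact hci
          simp only [List.foldl_cons, pvStepB, pvPrioB, hk', Bool.false_eq_true, if_false, hci,
            if_pos, pvLookupA, pvScanCI, hci']
          simpa using pvFoldB_one mn mnl mns w rest
        · have hci' : (PySem.Str.lower k == PySem.Str.lower mn) = false := by
            rw [← hmnl]; simpa using hci
          by_cases hp : (PySem.Str.isIn mnl (PySem.Str.lower k) || PySem.Str.isIn (PySem.Str.lower k) mnl ||
              PySem.Str.isIn mns (PySem.Str.replace (PySem.Str.lower k) " " "") ||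
              PySem.Str.isIn (PySem.Str.replace (PySem.Str.lower k) " " "") mns) = true
          · have hp' : (PySem.Str.isIn mnl (PySem.Str.lower k) || PySem.Str.isIn (PySem.Str.lower k) mnl ||
                PySem.Str.isIn (PySem.Str.replace mnl " " "") (PySem.Str.replace (PySem.Str.lower k) " " "") ||
                PySem.Str.isIn (PySem.Str.replace (PySem.Str.lower k) " " "") (PySem.Str.replace mnl " " "")) = true := by
              rw [hmns] at hp; exact hp
            simp only [List.foldl_cons, pvStepB, pvPrioB, hk', Bool.false_eq_true, if_false, hci,
              hp, if_pos, pvLookupA, pvScanCI, hci', pvScanPartial, hp']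
            simpa using pvFoldB_two mn mnl mns w hmnl rest
          · have hp' : (PySem.Str.isIn mnl (PySem.Str.lower k) || PySem.Str.isIn (PySem.Str.lower k) mnl ||
                PySem.Str.isIn (PySem.Str.replace mnl " " "") (PySem.Str.replace (PySem.Str.lower k) " " "") ||
                PySem.Str.isIn (PySem.Str.replace (PySem.Str.lower k) " " "") (PySem.Str.replace mnl " " "")) = false := by
              rw [hmns] at hp; simpa using hp
            simp only [List.foldl_cons, pvStepB, pvPrioB, hk', Bool.false_eq_true, if_false, hci,
              hp, pvLookupA, pvScanCI, hci', pvScanPartial, hp']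
            exact ih

-- B's table-driven provider scan equals A's if/elif chain
theorem pvProviderB_eq (mnl : String) :
    pvProviderB mnl pvTableB =
      (if PySem.Str.isIn "claude" mnl then "Anthropic"
       else if PySem.Str.isIn "command" mnl then "Cohere"
       else if PySem.Str.isIn "jurassic" mnl || PySem.Str.isIn "jamba" mnl then "AI21 Labs"
       else if PySem.Str.isIn "llama" mnl then "Meta"
       else if PySem.Str.isIn "titan" mnl || PySem.Str.isIn "nova" mnl then "Amazon"
       else if PySem.Str.isIn "mistral" mnl || PySem.Str.isIn "mixtral" mnl then "Mistral AI"
       else if PySem.Str.isIn "deepseek" mnl then "DeepSeek"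
       else "Unknown") := by
  simp only [pvTableB, pvProviderB, List.any_cons, List.any_nil, Bool.or_false]

-- ===== VERDICT (by name: the statement is the Claim_ definition above) =====
theorem get_model_info_from_name_spec : Claim_equal_get_model_info_from_name := by
  intro mn mm _
  unfold Spec_get_model_info_from_name
  have h := pvFoldB_main mn (PySem.Str.lower mn) (PySem.Str.replace (PySem.Str.lower mn) " " "") rfl rfl mm
  simp only [get_model_info_from_name, get_model_info_from_name_alt, h]
  cases pvLookupA mn mm with
  | some v => rfl
  | none =>
    cases pvScanCI mn mm with
    | some v => rfl
    | none =>
      cases pvScanPartial (PySem.Str.lower mn) mm with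
      | some v => rfl
      | none => simp [pvFallbackA, pvProviderB_eq]
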